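-- pv_equiv track=rewrite | github.com/udgirkarambarish/cloudVultr | test.py | is_closed_polygon
-- ===== SOURCE A (Python) =====
-- def is_closed_polygon(sticks):
--     points_count = {}
--
--     # Count the occurrences of each point
--     for x1, y1, x2, y2 in sticks:
--         points_count[(x1, y1)] = points_count.get((x1, y1), 0) + 1
--         points_count[(x2, y2)] = points_count.get((x2, y2), 0) + 1
--
--     # For a closed polygon, each point must occur exactly twice (once at the start and end)
--     for count in points_count.values():
--         if count != 2:
--             return False
--     return True
-- ===== SOURCE B (Python) =====
-- def is_closed_polygon(sticks):
--     # Pair off endpoints: repeatedly take the first remaining point and remove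
--     # its unique twin; closed iff everything pairs off with no third copy.
--     pts = []
--     for x1, y1, x2, y2 in sticks:
--         pts.append((x1, y1))
--         pts.append((x2, y2))
--     while pts:
--         p = pts.pop(0)
--         if p not in pts:
--             return False
--         pts.remove(p)
--         if p in pts:
--             return False
--     return True
-- ===== Notes on version B (the rewrite author's own statement) =====
-- stated objective: alternative
-- what changed: Replaces A's count-dictionary-then-scan-values with a destructive pair-off loop that repeatedly pops the first remaining endpoint, removes its unique twin and rejects any third copy, maintaining no counts at all.
import Mathlib
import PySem

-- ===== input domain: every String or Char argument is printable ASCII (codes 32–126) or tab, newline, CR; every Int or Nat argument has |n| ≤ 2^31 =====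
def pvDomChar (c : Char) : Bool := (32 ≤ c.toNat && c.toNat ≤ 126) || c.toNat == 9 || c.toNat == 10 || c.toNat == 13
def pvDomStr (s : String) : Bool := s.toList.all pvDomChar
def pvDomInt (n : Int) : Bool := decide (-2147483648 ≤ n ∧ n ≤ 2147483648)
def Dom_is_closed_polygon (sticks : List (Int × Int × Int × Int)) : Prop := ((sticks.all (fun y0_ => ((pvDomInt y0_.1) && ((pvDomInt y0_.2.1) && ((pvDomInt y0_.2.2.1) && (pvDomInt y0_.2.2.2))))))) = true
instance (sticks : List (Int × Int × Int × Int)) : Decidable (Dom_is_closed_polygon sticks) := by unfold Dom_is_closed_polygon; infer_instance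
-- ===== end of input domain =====

-- B replaces A's count-dictionary-then-values-scan with a destructive pair-off loop
-- (pop a point, remove its unique twin, reject a third copy); objective: alternative, not faster.


-- ===== PORT A =====
-- dict points_count updated with get(...,0)+1 for each endpoint; then all counts must be 2
def is_closed_polygon (sticks : List (Int × Int × Int × Int)) : Bool :=
  let points_count : PySem.Dict (Int × Int) Int :=
    sticks.foldl (fun d s =>
      let d := d.insert (s.1, s.2.1) (d.getD (s.1, s.2.1) 0 + 1)
      d.insert (s.2.2.1, s.2.2.2) (d.getD (s.2.2.1, s.2.2.2) 0 + 1)) PySem.Dict.empty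
  -- the early-return scan over the values is the all-test
  points_count.values.all (fun c => c == 2)

-- ===== PORT B =====
-- the 'while pts:' loop of Source B: pop(0), 'p not in pts' -> False, remove first twin,
-- 'p in pts' (a third copy) -> False, continue on the shortened list.
-- fuel = initial list length bounds the iteration count (the loop shortens the list each turn)
def pvPairOff : Nat → List (Int × Int) → Bool
  | _, [] => true
  | 0, _ :: _ => false
  | fuel + 1, p :: pts =>
    if p ∈ pts then
      let pts' := pts.erase p
      if p ∈ pts' then false else pvPairOff fuel pts'
    else false

def is_closed_polygon_alt (sticks : List (Int × Int × Int × Int)) : Bool :=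
  -- the building loop: two appends per stick
  let pts := sticks.foldl (fun acc s => acc ++ [(s.1, s.2.1), (s.2.2.1, s.2.2.2)]) []
  pvPairOff pts.length pts

-- ===== PRECONDITION & SPEC =====
def Spec_is_closed_polygon (sticks : List (Int × Int × Int × Int)) (out : Bool) : Prop := out = is_closed_polygon_alt sticks
instance (sticks : List (Int × Int × Int × Int)) (out : Bool) : Decidable (Spec_is_closed_polygon sticks out) := by unfold Spec_is_closed_polygon; infer_instance

-- ===== CLAIM (what is proved, stated in full; the proofs are below) =====
def Claim_equal_is_closed_polygon : Prop := ∀ (sticks : List (Int × Int × Int × Int)), Dom_is_closed_polygon sticks → Spec_is_closed_polygon sticks (is_closed_polygon sticks)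

-- ===== LEMMAS AND PROOFS =====

-- A's two inserts per stick are one insert per endpoint of the flattened list
theorem pvFoldTwo (l : List (Int × Int × Int × Int)) (d : PySem.Dict (Int × Int) Int) :
    l.foldl (fun d s =>
      let d := d.insert (s.1, s.2.1) (d.getD (s.1, s.2.1) 0 + 1)
      d.insert (s.2.2.1, s.2.2.2) (d.getD (s.2.2.1, s.2.2.2) 0 + 1)) d
    = (l.flatMap (fun s => [(s.1, s.2.1), (s.2.2.1, s.2.2.2)])).foldl
        (fun d p => d.insert p (d.getD p 0 + 1)) d := by
  induction l generalizing d with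
  | nil => rfl
  | cons a t ih => simp only [List.foldl_cons, List.flatMap_cons, List.foldl_append]; exact ih _

-- the pair-off loop succeeds exactly when every point of the list occurs exactly twice
theorem pvPairOff_iff (fuel : Nat) (l : List (Int × Int)) (hf : l.length ≤ fuel) :
    pvPairOff fuel l = true ↔ ∀ p ∈ l, l.count p = 2 := by
  induction fuel generalizing l with
  | zero =>
    have : l = [] := List.eq_nil_of_length_eq_zero (Nat.le_zero.mp hf)
    subst this; simp [pvPairOff]
  | succ fuel ih =>
    cases l with
    | nil => simp [pvPairOff]
    | cons p pts =>
      simp only [pvPairOff]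
      by_cases h : p ∈ pts
      · rw [if_pos h]
        by_cases h2 : p ∈ pts.erase p
        · -- a third copy remains: count p ≥ 3
          rw [if_pos h2]
          simp only [Bool.false_eq_true, false_iff]
          intro hall
          have hc := hall p List.mem_cons_self
          have he : (pts.erase p).count p = pts.count p - 1 := List.count_erase_self ..
          have h1 : 0 < pts.count p := List.count_pos_iff.mpr h
          have h2' : 0 < (pts.erase p).count p := List.count_pos_iff.mpr h2
          simp [List.count_cons_self] at hc
          omega
        · -- exactly one twin in pts; recurse on pts.erase p
          rw [if_neg h2]
          have hc1 : pts.count p = 1 := by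
            have he : (pts.erase p).count p = pts.count p - 1 := List.count_erase_self ..
            have hp := List.count_pos_iff.mpr h
            have hz : (pts.erase p).count p = 0 := by
              by_contra hne
              exact h2 (List.count_pos_iff.mp (Nat.pos_of_ne_zero hne))
            omega
          have hlen : (pts.erase p).length ≤ fuel := by
            have h3 : (pts.erase p).length ≤ pts.length := List.length_erase_le ..
            simp only [List.length_cons] at hf
            omega
          rw [ih _ hlen]
          constructor
          · intro hall q hq
            rcases List.mem_cons.mp hq with rfl | hq
            · simp [List.count_cons_self, hc1]
            · by_cases hqp : q = p
              · subst hqp; simp [List.count_cons_self, hc1]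
              · have hq' : q ∈ pts.erase p := List.mem_erase_of_ne hqp |>.mpr hq
                have := hall q hq'
                rw [List.count_cons_of_ne (Ne.symm hqp), ← List.count_erase_of_ne hqp]
                exact this
          · intro hall q hq
            have hqpts : q ∈ pts := List.mem_of_mem_erase hq
            have hqp : q ≠ p := by
              rintro rfl; exact h2 hq
            have := hall q (List.mem_cons_of_mem _ hqpts)
            rw [List.count_cons_of_ne (Ne.symm hqp)] at this
            rw [List.count_erase_of_ne hqp]
            exact this
      · -- the head has no twin at all
        rw [if_neg h]
        simp only [Bool.false_eq_true, false_iff]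
        intro hall
        have := hall p List.mem_cons_self
        have : pts.count p = 0 := List.count_eq_zero.mpr h
        simp [List.count_cons_self, this] at *

-- ===== VERDICT (by name: the statement is the Claim_ definition above) =====
theorem is_closed_polygon_spec : Claim_equal_is_closed_polygon := by
  intro sticks _
  unfold Spec_is_closed_polygon is_closed_polygon is_closed_polygon_alt
  rw [pvFoldTwo, PySem.Dict.foldl_insert_getD_add_one_eq_counter,
      PySem.List.foldl_append_eq_flatMap]
  set pts := sticks.flatMap (fun s => [(s.1, s.2.1), (s.2.2.1, s.2.2.2)]) with hpts
  change ((PySem.Dict.counter pts).values.all fun c => c == 2) = pvPairOff ([] ++ pts).length ([] ++ pts)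
  rw [List.nil_append]
  have hv : (PySem.Dict.counter pts).values
      = (PySem.Set.ofList pts).map (fun k => (pts.count k : Int)) := by
    show ((PySem.Dict.counter pts).items.map (·.2)) = _
    rw [PySem.Dict.items_counter]
    simp
  rw [hv, Bool.eq_iff_iff, pvPairOff_iff _ _ (Nat.le_refl _)]
  simp only [List.all_map, List.all_eq_true, Function.comp_def, PySem.Set.mem_ofList, beq_iff_eq]
  constructor
  · intro hh p hp; have := hh p hp; omega
  · intro hh p hp; have := hh p hp; omega
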